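-- pv_equiv track=rewrite | github.com/Safaet-Rabbi/Python | Codeforce/908A.py | min_flips_to_verify_statement
-- ===== SOURCE A (Python) =====
-- def min_flips_to_verify_statement(s):
--     vowels = set('aeiou')
--     odd_digits = set('13579')
--
--     flips_needed = 0
--
--     for char in s:
--         if char in vowels or char in odd_digits:
--             flips_needed += 1
--
--     return flips_needed
-- ===== SOURCE B (Python) =====
-- def min_flips_to_verify_statement(s):
--     return sum(s.count(c) for c in 'aeiou13579')
-- ===== Notes on version B (the rewrite author's own statement) =====
-- stated objective: simpler
-- what changed: B replaces A's single membership-testing pass with summing s.count(c) over the fixed 10-character target alphabet (one str.count scan per target character), a single expression with no explicit loop state.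
import Mathlib
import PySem

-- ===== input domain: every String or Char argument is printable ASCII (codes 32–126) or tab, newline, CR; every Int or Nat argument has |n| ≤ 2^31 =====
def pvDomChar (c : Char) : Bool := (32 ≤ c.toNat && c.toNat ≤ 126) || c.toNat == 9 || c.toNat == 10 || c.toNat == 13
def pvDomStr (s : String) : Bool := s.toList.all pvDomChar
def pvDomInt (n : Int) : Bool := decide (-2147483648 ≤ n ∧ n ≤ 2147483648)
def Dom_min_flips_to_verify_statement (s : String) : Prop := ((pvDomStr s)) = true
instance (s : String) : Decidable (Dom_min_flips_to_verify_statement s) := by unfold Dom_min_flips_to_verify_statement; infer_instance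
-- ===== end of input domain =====

-- B sums s.count(c) over the fixed 10-character target alphabet instead of A's single membership-testing pass; objective: simpler.


-- ===== PORT A =====
def min_flips_to_verify_statement (s : String) : Int :=
  let vowels : PySem.Set Char := PySem.Set.ofList "aeiou".toList
  let odd_digits : PySem.Set Char := PySem.Set.ofList "13579".toList
  s.toList.foldl (fun flips_needed char =>
    if PySem.Set.contains vowels char || PySem.Set.contains odd_digits char then
      flips_needed + 1
    else flips_needed) 0

-- ===== PORT B =====
def min_flips_to_verify_statement_alt (s : String) : Int :=
  ("aeiou13579".toList.map (fun c => (PySem.Str.count s (String.singleton c) : Int))).sum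

-- ===== PRECONDITION & SPEC =====
def Spec_min_flips_to_verify_statement (s : String) (out : Int) : Prop := out = min_flips_to_verify_statement_alt s
instance (s : String) (out : Int) : Decidable (Spec_min_flips_to_verify_statement s out) := by unfold Spec_min_flips_to_verify_statement; infer_instance

-- ===== CLAIM (what is proved, stated in full; the proofs are below) =====
def Claim_equal_min_flips_to_verify_statement : Prop := ∀ (s : String), Dom_min_flips_to_verify_statement s → Spec_min_flips_to_verify_statement s (min_flips_to_verify_statement s)

-- ===== LEMMAS AND PROOFS =====

-- count.go with a single-character needle counts occurrences of that character
theorem count_go_singleton (c : Char) (l : List Char) (fuel : Nat) (acc : Nat)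
    (h : l.length ≤ fuel) :
    PySem.Chars.count.go [c] fuel l acc = acc + l.count c := by
  induction l generalizing fuel acc with
  | nil =>
      cases fuel <;> simp [PySem.Chars.count.go]
  | cons hd tl ih =>
      cases fuel with
      | zero => simp at h
      | succ n =>
        have hlen : tl.length ≤ n := by simpa using h
        by_cases hc : c = hd
        · subst hc
          have hstep : PySem.Chars.count.go [c] (n + 1) (c :: tl) acc
              = PySem.Chars.count.go [c] n tl (acc + 1) := by
            simp [PySem.Chars.count.go, List.isPrefixOf]
          rw [hstep, ih n (acc + 1) hlen, List.count_cons]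
          simp; omega
        · have hstep : PySem.Chars.count.go [c] (n + 1) (hd :: tl) acc
              = PySem.Chars.count.go [c] n tl acc := by
            simp [PySem.Chars.count.go, List.isPrefixOf, hc]
          rw [hstep, ih n acc hlen, List.count_cons]
          simp [Ne.symm hc]

theorem chars_count_singleton (l : List Char) (c : Char) :
    PySem.Chars.count l [c] = l.count c := by
  simp [PySem.Chars.count, count_go_singleton c l l.length 0 le_rfl]

-- summing per-character counts over a duplicate-free alphabet is counting membership
theorem sum_ite_count (targets : List Char) (h : targets.Nodup) (hd : Char) :
    (targets.map (fun c => (if hd = c then (1 : Int) else 0))).sum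
      = if targets.contains hd then 1 else 0 := by
  induction targets with
  | nil => simp
  | cons t ts ih =>
      simp only [List.nodup_cons] at h
      by_cases he : hd = t
      · subst he
        have hz : (ts.map (fun c => (if hd = c then (1 : Int) else 0))) = ts.map (fun _ => 0) := by
          apply List.map_congr_left
          intro x hx
          have : hd ≠ x := fun hh => h.1 (hh ▸ hx)
          simp [this]
        simp [hz]
      · simp [List.map_cons, he, ih h.2]

theorem sum_counts (targets : List Char) (h : targets.Nodup) (l : List Char) :
    (targets.map (fun c => (l.count c : Int))).sum
      = (l.countP (fun ch => targets.contains ch) : Int) := by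
  induction l with
  | nil => simp
  | cons hd tl ih =>
      have hmap : (targets.map (fun c => ((hd :: tl).count c : Int)))
          = targets.map (fun c => (tl.count c : Int) + if hd = c then 1 else 0) := by
        apply List.map_congr_left
        intro x _
        by_cases hc : hd = x <;> simp [hc]
      rw [hmap, List.sum_map_add, ih, sum_ite_count targets h hd]
      by_cases hm : targets.contains hd = true
      · simp [List.countP_cons]
      · simp only [Bool.not_eq_true] at hm
        simp [List.countP_cons]

-- ===== VERDICT (by name: the statement is the Claim_ definition above) =====
theorem min_flips_to_verify_statement_spec : Claim_equal_min_flips_to_verify_statement := by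
  intro s _
  unfold Spec_min_flips_to_verify_statement min_flips_to_verify_statement min_flips_to_verify_statement_alt
  simp only [PySem.Str.count_eq, String.toList_singleton, chars_count_singleton]
  rw [PySem.List.foldl_if_add_one, sum_counts _ (by decide)]
  have hsplit : "aeiou13579".toList = "aeiou".toList ++ "13579".toList := by decide
  have hv : PySem.Set.ofList "aeiou".toList = "aeiou".toList := by decide
  have ho : PySem.Set.ofList "13579".toList = "13579".toList := by decide
  have hp : ∀ ch : Char,
      (PySem.Set.contains (PySem.Set.ofList "aeiou".toList) ch
        || PySem.Set.contains (PySem.Set.ofList "13579".toList) ch)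
      = "aeiou13579".toList.contains ch := by
    intro ch
    rw [hsplit, List.contains_append, hv, ho]
    rfl
  rw [zero_add]
  have hcount : List.countP
        (fun char => PySem.Set.contains (PySem.Set.ofList "aeiou".toList) char
          || PySem.Set.contains (PySem.Set.ofList "13579".toList) char) s.toList
      = List.countP (fun ch => "aeiou13579".toList.contains ch) s.toList :=
    List.countP_congr (fun x _ => by rw [hp x])
  rw [hcount]
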